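-- pv_equiv track=rewrite | github.com/AiolioSenpai/info-bot | info.py | prioritize_tips
-- ===== SOURCE A (Python) =====
-- def prioritize_tips(tips):
--     # Score tips based on keywords and brevity
--     def score_tip(tip):
--         score = 0
--         text = tip['details'] if isinstance(tip, dict) else tip
--         keywords = ["priority", "prioritize", "key", "focus", "essential", "critical"]
--         for kw in keywords:
--             if kw.lower() in text.lower():
--                 score += 10
--         score -= len(text) // 50  # Prefer shorter tips
--         return score
--
--     if isinstance(tips, str):
--         tips = tips.split("\n")
--     scored_tips = [(tip, score_tip(tip)) for tip in tips]
--     scored_tips.sort(key=lambda x: x[1], reverse=True)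
--     return [tip[0] for tip in scored_tips[:2]]  # Top 2 tips
-- ===== SOURCE B (Python) =====
-- def prioritize_tips(tips):
--     # Same scoring; replaces the full reverse-sort + [:2] slice by a single
--     # linear pass that tracks the two best-scoring tips (stable on ties).
--     def score_tip(tip):
--         score = 0
--         text = tip['details'] if isinstance(tip, dict) else tip
--         keywords = ["priority", "prioritize", "key", "focus", "essential", "critical"]
--         for kw in keywords:
--             if kw.lower() in text.lower():
--                 score += 10
--         score -= len(text) // 50  # Prefer shorter tips
--         return score
--
--     if isinstance(tips, str):
--         tips = tips.split("\n")
--     best = []  # at most two (tip, score) pairs, score-descending, stable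
--     for tip in tips:
--         s = score_tip(tip)
--         if not best or s > best[0][1]:
--             best = [(tip, s)] + best[:1]
--         elif len(best) < 2 or s > best[1][1]:
--             best = [best[0], (tip, s)]
--     return [t for t, _ in best]
-- ===== Notes on version B (the rewrite author's own statement) =====
-- stated objective: alternative
-- what changed: The stable reverse sort of all scored tips followed by a [:2] slice is replaced by one linear pass that maintains only the two best (tip, score) pairs, preserving the stable-sort tie order.
import Mathlib
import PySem

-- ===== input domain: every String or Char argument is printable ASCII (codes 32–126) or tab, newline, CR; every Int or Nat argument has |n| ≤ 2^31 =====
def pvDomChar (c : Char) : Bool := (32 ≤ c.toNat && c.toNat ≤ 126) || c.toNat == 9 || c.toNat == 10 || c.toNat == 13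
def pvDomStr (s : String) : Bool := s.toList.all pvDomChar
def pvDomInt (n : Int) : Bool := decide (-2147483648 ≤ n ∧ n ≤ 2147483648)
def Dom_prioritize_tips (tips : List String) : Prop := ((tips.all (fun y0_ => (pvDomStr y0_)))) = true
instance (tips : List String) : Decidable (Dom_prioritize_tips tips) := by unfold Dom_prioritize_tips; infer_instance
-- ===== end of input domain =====

-- B replaces A's full stable reverse-sort + [:2] slice with one linear pass keeping the two best pairs (alternative; not measured faster).

-- ===== PORT A =====
-- score_tip: tips is a list of strings here, so `isinstance(tip, dict)` is always False and text = tip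
def pvScoreTip (tip : String) : Int :=
  let text := tip
  let keywords : List String := ["priority", "prioritize", "key", "focus", "essential", "critical"]
  let score : Int := keywords.foldl (fun score kw =>
    if PySem.Str.isIn (PySem.Str.lower kw) (PySem.Str.lower text) then score + 10 else score) 0
  score - PySem.Int.floordiv (PySem.Str.len text) 50

def prioritize_tips (tips : List String) : List String :=
  -- tips : List String, so Python's `isinstance(tips, str)` split branch never fires
  let scored_tips := tips.map (fun tip => (tip, pvScoreTip tip))
  let scored_tips := PySem.List.sorted scored_tips (fun x => x.2) true
  (scored_tips.take 2).map (fun tip => tip.1)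

-- ===== PORT B =====
-- Source B's loop body: update the ≤2-element `best` list with one scored tip
def pvStep (best : List (String × Int)) (x : String × Int) : List (String × Int) :=
  match best with
  | [] => [x]
  | b0 :: rest =>
    if x.2 > b0.2 then [x, b0]
    else match rest with
      | [] => [b0, x]
      | b1 :: _ => if x.2 > b1.2 then [b0, x] else best

def prioritize_tips_alt (tips : List String) : List String :=
  let best := tips.foldl (fun best tip => pvStep best (tip, pvScoreTip tip)) []
  best.map (fun p => p.1)

-- ===== PRECONDITION & SPEC =====
def Spec_prioritize_tips (tips : List String) (out : List String) : Prop := out = prioritize_tips_alt tips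
instance (tips : List String) (out : List String) : Decidable (Spec_prioritize_tips tips out) := by unfold Spec_prioritize_tips; infer_instance

-- ===== CLAIM (what is proved, stated in full; the proofs are below) =====
def Claim_equal_prioritize_tips : Prop := ∀ (tips : List String), Dom_prioritize_tips tips → Spec_prioritize_tips tips (prioritize_tips tips)

-- ===== LEMMAS AND PROOFS =====

-- the first two elements of a stable descending insertion depend only on the first two already there
theorem take_two_insertBy (s : List (String × Int)) (x : String × Int) :
    (PySem.List.insertBy (fun a b => decide (b.2 < a.2)) x s).take 2 = pvStep (s.take 2) x := by
  match s with
  | [] => simp [PySem.List.insertBy, pvStep]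
  | [y] =>
    by_cases h : y.2 < x.2 <;>
      simp [PySem.List.insertBy, pvStep, h]
  | y :: z :: t =>
    by_cases h1 : y.2 < x.2
    · simp [PySem.List.insertBy, pvStep, h1]
    · by_cases h2 : z.2 < x.2 <;>
        simp [PySem.List.insertBy, pvStep, h1, h2]

theorem take_two_foldl_insertBy (l : List (String × Int)) (acc : List (String × Int)) :
    (l.foldl (fun a x => PySem.List.insertBy (fun a b => decide (b.2 < a.2)) x a) acc).take 2
      = l.foldl pvStep (acc.take 2) := by
  induction l generalizing acc with
  | nil => rfl
  | cons x l ih => simp only [List.foldl_cons, ih, take_two_insertBy]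

-- ===== VERDICT (by name: the statement is the Claim_ definition above) =====
theorem prioritize_tips_spec : Claim_equal_prioritize_tips := by
  intro tips _
  show _ = _
  simp only [prioritize_tips, prioritize_tips_alt, PySem.List.sorted_rev_eq_foldl_insertBy]
  rw [take_two_foldl_insertBy]
  simp only [List.foldl_map, List.take_nil]
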